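-- pv_equiv track=rewrite | github.com/moleece/aoc_23 | 2024/michael/21/solution.py | arrowPadOptions
-- ===== SOURCE A (Python) =====
-- def arrowPadOptions(arrowString):
--     arrowPos = {
--         '^': (0,1),
--         'A': (0,2),
--         '<': (1,0),
--         'v': (1,1),
--         '>': (1,2)
--     }
--     pos = (0,2)
--     seqs = ['']
--     for arrow in arrowString:
--         newPos = arrowPos[arrow]
--         dy = newPos[0] - pos[0]
--         dx = newPos[1] - pos[1]
--         path1 = ('v' if dy > 0 else '^') * abs(dy) + ('>' if dx > 0 else '<') * abs(dx) + 'A'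
--         path2 = ('>' if dx > 0 else '<') * abs(dx) + ('v' if dy > 0 else '^') * abs(dy) + 'A'
--         if pos[0] == 0 and newPos[1] == 0:
--             newPaths = [path1]
--         elif pos[1] == 0 and newPos[0] == 0:
--             newPaths = [path2]
--         else:
--             newPaths = [path1, path2]
--
--         newSeqs = []
--         for s in seqs:
--             for p in newPaths:
--                 newSeqs.append(s + p)
--         seqs = newSeqs
--         pos = newPos
--     return list(set(seqs))
-- ===== SOURCE B (Python) =====
-- def _moveOptions(pos, newPos):
--     dy = newPos[0] - pos[0]
--     dx = newPos[1] - pos[1]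
--     vert = ('v' if dy > 0 else '^') * abs(dy)
--     horiz = ('>' if dx > 0 else '<') * abs(dx)
--     if pos[0] == 0 and newPos[1] == 0:
--         return [vert + horiz + 'A']
--     if pos[1] == 0 and newPos[0] == 0:
--         return [horiz + vert + 'A']
--     return [vert + horiz + 'A', horiz + vert + 'A']
--
--
-- def _combine(options):
--     if not options:
--         return ['']
--     rests = _combine(options[1:])
--     return [p + r for p in options[0] for r in rests]
--
--
-- def arrowPadOptions(arrowString):
--     arrowPos = {
--         '^': (0, 1),
--         'A': (0, 2),
--         '<': (1, 0),
--         'v': (1, 1),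
--         '>': (1, 2)
--     }
--     options = []
--     pos = (0, 2)
--     for arrow in arrowString:
--         newPos = arrowPos[arrow]
--         options.append(_moveOptions(pos, newPos))
--         pos = newPos
--     return list(set(_combine(options)))
-- ===== Notes on version B (the rewrite author's own statement) =====
-- stated objective: alternative
-- what changed: B separates the work into two phases: one pass over the string builds the per-move candidate list, and a recursive Cartesian combination then joins all moves at once, instead of A's single loop that rebuilds the whole accumulated sequence list at every move.
import Mathlib
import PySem

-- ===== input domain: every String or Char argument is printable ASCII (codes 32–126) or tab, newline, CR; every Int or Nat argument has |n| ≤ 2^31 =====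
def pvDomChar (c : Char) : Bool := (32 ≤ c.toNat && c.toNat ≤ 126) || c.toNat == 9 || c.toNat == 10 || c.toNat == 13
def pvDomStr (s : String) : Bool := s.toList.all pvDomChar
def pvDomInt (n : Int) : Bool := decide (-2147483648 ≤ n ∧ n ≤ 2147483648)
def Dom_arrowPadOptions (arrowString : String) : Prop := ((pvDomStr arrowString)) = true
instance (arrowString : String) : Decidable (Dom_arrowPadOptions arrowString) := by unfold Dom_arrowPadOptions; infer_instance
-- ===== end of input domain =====

-- B is an alternative decomposition of A (two phases: a per-move option table, then one Cartesian combination);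
-- equal return VALUE proved (Python's list(set(...)) hash order is not modelled: both ports dedup keeping first occurrences).

-- ===== PORT A =====
-- A's single loop: state (pos, seqs); at each arrow it extends every accumulated sequence by every path of the move.
-- the dict lookup arrowPos[arrow]: total via getD (0,2); Pre_ restricts to the dict's keys (otherwise Python raises KeyError).
def arrowPadOptions (arrowString : String) : List String :=
  let arrowPos : PySem.Dict Char (Int × Int) :=
    PySem.Dict.ofList [('^', (0,1)), ('A', (0,2)), ('<', (1,0)), ('v', (1,1)), ('>', (1,2))]
  let final := arrowString.toList.foldl
    (fun (st : (Int × Int) × List (List Char)) (arrow : Char) =>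
      let pos := st.1
      let newPos := (PySem.Dict.get? arrowPos arrow).getD (0,2)
      let dy := newPos.1 - pos.1
      let dx := newPos.2 - pos.2
      let path1 := List.replicate dy.natAbs (if dy > 0 then 'v' else '^')
                   ++ List.replicate dx.natAbs (if dx > 0 then '>' else '<') ++ ['A']
      let path2 := List.replicate dx.natAbs (if dx > 0 then '>' else '<')
                   ++ List.replicate dy.natAbs (if dy > 0 then 'v' else '^') ++ ['A']
      let newPaths := if pos.1 = 0 ∧ newPos.2 = 0 then [path1]
                      else if pos.2 = 0 ∧ newPos.1 = 0 then [path2]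
                      else [path1, path2]
      let newSeqs := st.2.flatMap (fun s => newPaths.map (fun p => s ++ p))
      (newPos, newSeqs))
    ((0,2), [[]])
  PySem.Set.ofList (final.2.map String.ofList)

-- ===== PORT B =====
-- _moveOptions(pos, newPos): the candidate paths for one move
def pvMoveOptions (pos newPos : Int × Int) : List (List Char) :=
  let dy := newPos.1 - pos.1
  let dx := newPos.2 - pos.2
  let vert := List.replicate dy.natAbs (if dy > 0 then 'v' else '^')
  let horiz := List.replicate dx.natAbs (if dx > 0 then '>' else '<')
  if pos.1 = 0 ∧ newPos.2 = 0 then [vert ++ horiz ++ ['A']]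
  else if pos.2 = 0 ∧ newPos.1 = 0 then [horiz ++ vert ++ ['A']]
  else [vert ++ horiz ++ ['A'], horiz ++ vert ++ ['A']]

-- _combine(options): Cartesian combination of the per-move candidate lists
def pvCombine : List (List (List Char)) → List (List Char)
  | [] => [[]]
  | o :: rest => o.flatMap (fun p => (pvCombine rest).map (fun r => p ++ r))

def arrowPadOptions_alt (arrowString : String) : List String :=
  let arrowPos : PySem.Dict Char (Int × Int) :=
    PySem.Dict.ofList [('^', (0,1)), ('A', (0,2)), ('<', (1,0)), ('v', (1,1)), ('>', (1,2))]
  let final := arrowString.toList.foldl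
    (fun (st : (Int × Int) × List (List (List Char))) (arrow : Char) =>
      let newPos := (PySem.Dict.get? arrowPos arrow).getD (0,2)
      (newPos, st.2 ++ [pvMoveOptions st.1 newPos]))
    ((0,2), [])
  PySem.Set.ofList ((pvCombine final.2).map String.ofList)

-- ===== PRECONDITION & SPEC =====
-- Pre_ excludes strings with a character outside the arrow pad's keys, on which Python A raises KeyError (B does too).
def Pre_arrowPadOptions (arrowString : String) : Prop :=
  arrowString.toList.all (['^', 'A', '<', 'v', '>'].contains ·) = true
instance (arrowString : String) : Decidable (Pre_arrowPadOptions arrowString) := by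
  unfold Pre_arrowPadOptions; infer_instance

def pvWitness_arrowPadOptions : String := "A<v^>"

def Spec_arrowPadOptions (arrowString : String) (out : List String) : Prop := out = arrowPadOptions_alt arrowString
instance (arrowString : String) (out : List String) : Decidable (Spec_arrowPadOptions arrowString out) := by unfold Spec_arrowPadOptions; infer_instance

-- ===== CLAIM (what is proved, stated in full; the proofs are below) =====
def Claim_equal_arrowPadOptions : Prop := ∀ (arrowString : String), Dom_arrowPadOptions arrowString → Pre_arrowPadOptions arrowString → Spec_arrowPadOptions arrowString (arrowPadOptions arrowString)

-- ===== LEMMAS AND PROOFS =====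

-- named forms of the two ports' loop bodies (definitionally equal to the inline lambdas)
def pvNext (c : Char) : Int × Int :=
  (PySem.Dict.get?
    (PySem.Dict.ofList [('^', ((0:Int),(1:Int))), ('A', (0,2)), ('<', (1,0)), ('v', (1,1)), ('>', (1,2))]) c).getD (0,2)

def pvStepA (st : (Int × Int) × List (List Char)) (c : Char) : (Int × Int) × List (List Char) :=
  (pvNext c, st.2.flatMap (fun s => (pvMoveOptions st.1 (pvNext c)).map (fun p => s ++ p)))

def pvStepB (st : (Int × Int) × List (List (List Char))) (c : Char) :
    (Int × Int) × List (List (List Char)) :=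
  (pvNext c, st.2 ++ [pvMoveOptions st.1 (pvNext c)])

theorem pv_foldB_acc (l : List Char) : ∀ (pos : Int × Int) (acc : List (List (List Char))),
    (l.foldl pvStepB (pos, acc)).2 = acc ++ (l.foldl pvStepB (pos, [])).2 := by
  induction l with
  | nil => intro pos acc; simp
  | cons c cs ih =>
    intro pos acc
    simp only [List.foldl_cons, pvStepB, List.nil_append]
    rw [ih, ih (pvNext c) [pvMoveOptions pos (pvNext c)]]
    simp

-- the central bridge: A's interleaved fold equals the Cartesian combination of B's option table
theorem pv_fold_main (l : List Char) : ∀ (pos : Int × Int) (seqs : List (List Char)),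
    (l.foldl pvStepA (pos, seqs)).2
      = seqs.flatMap (fun s =>
          (pvCombine ((l.foldl pvStepB (pos, [])).2)).map (fun r => s ++ r)) := by
  induction l with
  | nil => intro pos seqs; simp [pvCombine]
  | cons c cs ih =>
    intro pos seqs
    simp only [List.foldl_cons, pvStepA, pvStepB, List.nil_append]
    rw [ih, pv_foldB_acc cs (pvNext c) [pvMoveOptions pos (pvNext c)]]
    simp [pvCombine, List.flatMap_assoc, List.map_flatMap, List.flatMap_map,
      List.map_map, Function.comp_def, List.append_assoc]

theorem arrowPadOptions_eq_alt (arrowString : String) :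
    arrowPadOptions arrowString = arrowPadOptions_alt arrowString := by
  show PySem.Set.ofList
        (((arrowString.toList.foldl pvStepA ((0,2), [[]])).2).map String.ofList)
      = PySem.Set.ofList
        ((pvCombine ((arrowString.toList.foldl pvStepB ((0,2), [])).2)).map String.ofList)
  rw [pv_fold_main]
  simp

-- ===== VERDICT (by name: the statement is the Claim_ definition above) =====
theorem arrowPadOptions_spec : Claim_equal_arrowPadOptions := by
  intro s _ _
  unfold Spec_arrowPadOptions
  exact arrowPadOptions_eq_alt s
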